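-- pv_equiv track=rewrite | github.com/harada4atsushi/reversi | player/minmax_player.py | get_best_positions
-- ===== SOURCE A (Python) =====
-- def get_best_positions(successors_list):
--     max_gain = 0
--     best_positions = []
--
--     for (move, state, gain) in successors_list:
--         if max_gain < gain:
--             max_gain = gain
--
--     for (move, state, gain) in successors_list:
--         if gain == max_gain:
--             best_positions.append(move)
--
--     return best_positions
-- ===== SOURCE B (Python) =====
-- def get_best_positions(successors_list):
--     max_gain = 0
--     best_positions = []
--     for (move, state, gain) in successors_list:
--         if max_gain < gain:
--             max_gain = gain
--             best_positions = [move]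
--         elif gain == max_gain:
--             best_positions.append(move)
--     return best_positions
-- ===== Notes on version B (the rewrite author's own statement) =====
-- stated objective: simpler
-- what changed: Replaces A's two sequential scans (one computing the maximum gain, one collecting moves with that gain) with a single pass that tracks the running maximum and resets/extends the collected moves as it goes.
import Mathlib
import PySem

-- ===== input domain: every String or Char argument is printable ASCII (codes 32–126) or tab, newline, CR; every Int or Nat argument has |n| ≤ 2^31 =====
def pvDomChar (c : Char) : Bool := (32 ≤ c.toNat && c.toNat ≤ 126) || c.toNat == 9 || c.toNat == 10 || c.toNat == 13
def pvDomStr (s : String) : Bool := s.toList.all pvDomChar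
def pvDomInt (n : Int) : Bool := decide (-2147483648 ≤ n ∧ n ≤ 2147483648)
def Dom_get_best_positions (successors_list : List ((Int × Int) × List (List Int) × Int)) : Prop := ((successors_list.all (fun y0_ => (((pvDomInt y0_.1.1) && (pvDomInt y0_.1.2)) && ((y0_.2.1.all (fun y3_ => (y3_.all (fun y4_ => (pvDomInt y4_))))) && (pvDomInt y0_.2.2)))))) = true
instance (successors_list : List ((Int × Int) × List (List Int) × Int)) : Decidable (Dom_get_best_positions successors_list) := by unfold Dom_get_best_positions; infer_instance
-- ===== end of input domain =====

-- B merges A's two sequential scans into a single pass maintaining the running maximum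
-- and the moves achieving it (objective: simpler, one loop instead of two).

-- ===== PORT A =====
-- first loop: max_gain starts at 0, raised whenever max_gain < gain
-- second loop: collect moves whose gain equals max_gain
def get_best_positions (successors_list : List ((Int × Int) × List (List Int) × Int)) : List (Int × Int) :=
  let max_gain := successors_list.foldl (fun m t => if m < t.2.2 then t.2.2 else m) 0
  successors_list.foldl (fun best t => if t.2.2 = max_gain then best ++ [t.1] else best) []

-- ===== PORT B =====
-- one pass: state is (max_gain, best_positions); a strictly greater gain resets the list,
-- an equal gain appends the move
def bStep (st : Int × List (Int × Int)) (t : (Int × Int) × List (List Int) × Int) :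
    Int × List (Int × Int) :=
  if st.1 < t.2.2 then (t.2.2, [t.1])
  else if t.2.2 = st.1 then (st.1, st.2 ++ [t.1])
  else st

def get_best_positions_alt (successors_list : List ((Int × Int) × List (List Int) × Int)) : List (Int × Int) :=
  (successors_list.foldl bStep (0, [])).2

-- ===== PRECONDITION & SPEC =====
def Spec_get_best_positions (successors_list : List ((Int × Int) × List (List Int) × Int)) (out : List (Int × Int)) : Prop := out = get_best_positions_alt successors_list
instance (successors_list : List ((Int × Int) × List (List Int) × Int)) (out : List (Int × Int)) : Decidable (Spec_get_best_positions successors_list out) := by unfold Spec_get_best_positions; infer_instance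

-- ===== CLAIM (what is proved, stated in full; the proofs are below) =====
def Claim_equal_get_best_positions : Prop := ∀ (successors_list : List ((Int × Int) × List (List Int) × Int)), Dom_get_best_positions successors_list → Spec_get_best_positions successors_list (get_best_positions successors_list)

-- ===== LEMMAS AND PROOFS =====

-- the running-maximum fold of A
def maxF (m : Int) (xs : List ((Int × Int) × List (List Int) × Int)) : Int :=
  xs.foldl (fun m t => if m < t.2.2 then t.2.2 else m) m

lemma le_maxF (m : Int) (xs : List ((Int × Int) × List (List Int) × Int)) : m ≤ maxF m xs := by
  induction xs generalizing m with
  | nil => simp [maxF]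
  | cons t rest ih =>
    simp only [maxF, List.foldl_cons] at *
    split
    · exact le_trans (le_of_lt (by assumption)) (ih _)
    · exact ih _

-- A's second loop is a filter-map
lemma collect_eq (M : Int) (xs : List ((Int × Int) × List (List Int) × Int))
    (acc : List (Int × Int)) :
    xs.foldl (fun best t => if t.2.2 = M then best ++ [t.1] else best) acc
      = acc ++ (xs.filter (fun t => t.2.2 == M)).map Prod.fst := by
  induction xs generalizing acc with
  | nil => simp
  | cons t rest ih =>
    simp only [List.foldl_cons, List.filter_cons]
    by_cases h : t.2.2 = M <;> simp [h, ih]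

-- invariant of B's single pass
lemma bFold_eq (xs : List ((Int × Int) × List (List Int) × Int)) (m : Int)
    (acc : List (Int × Int)) :
    xs.foldl bStep (m, acc)
      = (maxF m xs,
         (if maxF m xs = m then acc else [])
           ++ (xs.filter (fun t => t.2.2 == maxF m xs)).map Prod.fst) := by
  induction xs generalizing m acc with
  | nil => simp [maxF]
  | cons t rest ih =>
    have hM : ∀ m', m' ≤ maxF m' rest := fun m' => le_maxF m' rest
    simp only [List.foldl_cons, List.filter_cons, maxF, bStep]
    by_cases h1 : m < t.2.2
    · simp only [if_pos h1]
      rw [ih]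
      have hle : t.2.2 ≤ maxF t.2.2 rest := hM _
      simp only [maxF] at hle ⊢
      by_cases h2 : rest.foldl (fun m t => if m < t.2.2 then t.2.2 else m) t.2.2 = t.2.2
      · have hne : t.2.2 ≠ m := by omega
        simp [h2, hne]
      · have hne : rest.foldl (fun m t => if m < t.2.2 then t.2.2 else m) t.2.2 ≠ m := by omega
        have hb : (t.2.2 == rest.foldl (fun m t => if m < t.2.2 then t.2.2 else m) t.2.2) = false := by
          simp; omega
        simp [h2, hne, hb]
    · simp only [if_neg h1]
      by_cases h2 : t.2.2 = m
      · subst h2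
        rw [ih]
        have hle : t.2.2 ≤ maxF t.2.2 rest := hM _
        simp only [maxF] at hle ⊢
        by_cases h3 : rest.foldl (fun m t => if m < t.2.2 then t.2.2 else m) t.2.2 = t.2.2
        · simp [h3]
        · have hb : (t.2.2 == rest.foldl (fun m t => if m < t.2.2 then t.2.2 else m) t.2.2) = false := by
            simp; omega
          simp [h3, hb]
      · simp only [if_neg h2]
        rw [ih]
        have hle : m ≤ maxF m rest := hM _
        simp only [maxF] at hle ⊢
        have hb : (t.2.2 == rest.foldl (fun m t => if m < t.2.2 then t.2.2 else m) m) = false := by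
          simp; omega
        simp [hb]

-- ===== VERDICT (by name: the statement is the Claim_ definition above) =====
theorem get_best_positions_spec : Claim_equal_get_best_positions := by
  intro xs _
  unfold Spec_get_best_positions get_best_positions get_best_positions_alt
  rw [bFold_eq, collect_eq]
  simp only [maxF]
  split <;> rfl
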